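-- pv_equiv track=rewrite | github.com/Pratik0182/dsa | 2260-divide-a-string-into-groups-of-size-k/2260-divide-a-string-into-groups-of-size-k.py | divideString
-- ===== SOURCE A (Python) =====
-- def divideString(s, k, fill):
--     res = []
--     N = len(s)
--     for i in range(0, N, k):
--         if i + k >= N:
--             curr = s[i::] + (i + k - N) * fill
--             res.append(curr)
--         else:
--             res.append(s[i:i + k])
--     return res
-- ===== SOURCE B (Python) =====
-- def divideString(s, k, fill):
--     # recursive decomposition: peel k chars off the front until the tail is short,
--     # then pad the final short tail; k <= 0 yields no groups (range is empty in that case)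
--     if k <= 0:
--         return []
--     def go(t):
--         if not t:
--             return []
--         if len(t) < k:
--             return [t + fill * (k - len(t))]
--         return [t[:k]] + go(t[k:])
--     return go(s)
-- ===== Notes on version B (the rewrite author's own statement) =====
-- stated objective: alternative
-- what changed: B replaces A's index loop over range(0,N,k) with a recursive decomposition that repeatedly peels the first k characters off the string (take/drop, no index arithmetic) and pads the final short tail in closed form.
import Mathlib
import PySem

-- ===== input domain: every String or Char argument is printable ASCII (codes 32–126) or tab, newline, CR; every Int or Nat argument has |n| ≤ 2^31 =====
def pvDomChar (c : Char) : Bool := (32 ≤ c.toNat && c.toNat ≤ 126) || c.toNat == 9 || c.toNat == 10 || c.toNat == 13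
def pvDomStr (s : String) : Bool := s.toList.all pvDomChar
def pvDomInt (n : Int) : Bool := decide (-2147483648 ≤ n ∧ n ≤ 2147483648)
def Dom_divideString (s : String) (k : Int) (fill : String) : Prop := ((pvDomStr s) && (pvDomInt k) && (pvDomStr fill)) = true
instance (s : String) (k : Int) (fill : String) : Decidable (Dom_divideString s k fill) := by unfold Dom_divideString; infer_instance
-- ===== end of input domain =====

-- B replaces A's index loop over range(0, N, k) by a recursive decomposition that peels the
-- first k characters off the string and pads the final short tail (objective: alternative).

-- ===== PORT A =====
def divideString (s : String) (k : Int) (fill : String) : List String :=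
  let cs := s.toList
  let N : Int := cs.length
  (PySem.List.pyRange 0 N k).foldl (fun res i =>
    if N ≤ i + k then
      res ++ [String.ofList (PySem.List.slice cs (some i) none ++
                          PySem.List.pyRepeat fill.toList (i + k - N))]
    else
      res ++ [String.ofList (PySem.List.slice cs (some i) (some (i + k)))]) []

-- ===== PORT B =====
-- recursive chunker: peel the first k chars until the tail is short, then pad it
def dsGo (fill : List Char) (k : Int) (hk : 0 < k) (t : List Char) : List String :=
  if h0 : t = [] then []
  else if (t.length : Int) < k then
    [String.ofList (t ++ PySem.List.pyRepeat fill (k - (t.length : Int)))]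
  else
    String.ofList (PySem.List.slice t none (some k)) ::
      dsGo fill k hk (PySem.List.slice t (some k) none)
termination_by t.length
decreasing_by
  rw [PySem.List.slice_from t (le_of_lt hk)]
  have h2 : 0 < t.length := List.length_pos_of_ne_nil h0
  simp only [List.length_drop]
  omega

def divideString_alt (s : String) (k : Int) (fill : String) : List String :=
  if hk : 0 < k then dsGo fill.toList k hk s.toList else []

-- ===== PRECONDITION & SPEC =====
-- Pre_ excludes only k = 0, where Python A raises (range(0, len(s), 0) is a ValueError).
def Pre_divideString (s : String) (k : Int) (fill : String) : Prop := k ≠ 0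
instance (s : String) (k : Int) (fill : String) : Decidable (Pre_divideString s k fill) := by
  unfold Pre_divideString; infer_instance
def pvWitness_divideString : String × Int × String := ("abcde", 2, "x")

def Spec_divideString (s : String) (k : Int) (fill : String) (out : List String) : Prop := out = divideString_alt s k fill
instance (s : String) (k : Int) (fill : String) (out : List String) : Decidable (Spec_divideString s k fill out) := by unfold Spec_divideString; infer_instance

-- ===== CLAIM (what is proved, stated in full; the proofs are below) =====
def Claim_equal_divideString : Prop := ∀ (s : String) (k : Int) (fill : String), Dom_divideString s k fill → Pre_divideString s k fill → Spec_divideString s k fill (divideString s k fill)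
-- ===== LEMMAS AND PROOFS =====

-- range(0, N, k) is empty for a negative step and nonnegative N
theorem pyRange_neg_step_nil (N k : Int) (h0 : 0 ≤ N) (hk : k < 0) :
    PySem.List.pyRange 0 N k = [] := by
  simp [PySem.List.pyRange]
  split_ifs <;> simp_all <;> omega

-- the per-group body of A's loop, as a function of the group index j (i = k*j)
def aBody (fill : List Char) (k : Int) (cs : List Char) (j : Nat) : String :=
  if (cs.length : Int) ≤ k * (j : Int) + k then
    String.ofList (PySem.List.slice cs (some (k * (j : Int))) none ++
      PySem.List.pyRepeat fill (k * (j : Int) + k - (cs.length : Int)))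
  else
    String.ofList (PySem.List.slice cs (some (k * (j : Int))) (some (k * (j : Int) + k)))

-- shifting A's group index by one is A's body on the k-dropped string (for k ≤ N)
theorem aBody_shift (fill : List Char) (k : Int) (hk : 0 < k) (cs : List Char)
    (hkN : k ≤ (cs.length : Int)) (j : Nat) :
    aBody fill k cs (j + 1) = aBody fill k (cs.drop k.toNat) j := by
  have hlen : ((cs.drop k.toNat).length : Int) = (cs.length : Int) - k := by
    simp only [List.length_drop]; omega
  have hnn0 : (0:Int) ≤ k * (j : Int) := by positivity
  have hcast : (((j : Nat) + 1 : Nat) : Int) = (j : Int) + 1 := by push_cast; ring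
  unfold aBody
  rw [hlen, hcast]
  have hmul : k * ((j : Int) + 1) = k * (j : Int) + k := by ring
  rw [hmul]
  have hcond : ((cs.length : Int) ≤ k * (j : Int) + k + k) ↔
      ((cs.length : Int) - k ≤ k * (j : Int) + k) := by omega
  have hdropeq : PySem.List.slice cs (some (k * (j:Int) + k)) none
      = PySem.List.slice (cs.drop k.toNat) (some (k * (j:Int))) none := by
    rw [PySem.List.slice_from cs (by omega : (0:Int) ≤ k * (j:Int) + k),
        PySem.List.slice_from _ hnn0, List.drop_drop]
    congr 1
    omega
  split_ifs with h1 h2 h2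
  · have hpad : k * (j:Int) + k + k - (cs.length:Int) = k * (j:Int) + k - ((cs.length:Int) - k) := by ring
    rw [hdropeq, hpad]
  · exact absurd (hcond.mp h1) h2
  · exact absurd (hcond.mpr h2) h1
  · rw [PySem.List.slice_toNat cs (by omega) (by omega),
        PySem.List.slice_toNat _ hnn0 (by omega), List.drop_drop]
    have e1 : (k * (j:Int) + k + k).toNat - (k * (j:Int) + k).toNat = (k * (j:Int) + k).toNat - (k * (j:Int)).toNat := by omega
    have e2 : (k * (j:Int) + k).toNat = k.toNat + (k * (j:Int)).toNat := by omega
    rw [e1, e2]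

-- the map form of A's loop equals B's recursion, by strong induction on the string length
theorem chunk_eq (fill : List Char) (k : Int) (hk : 0 < k) :
    ∀ (n : Nat) (cs : List Char), cs.length = n →
      (List.range (if (0:Int) < (cs.length : Int) then (((cs.length : Int) + k - 1) / k).toNat else 0)).map
        (aBody fill k cs) = dsGo fill k hk cs := by
  intro n
  induction n using Nat.strong_induction_on with
  | _ n ih =>
    intro cs rfl
    by_cases h0 : cs = []
    · subst h0; rw [dsGo]; simp
    · have hNpos : (0:Int) < (cs.length : Int) := by
        have := List.length_pos_of_ne_nil h0; exact_mod_cast this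
      set N : Int := (cs.length : Int) with hN
      set q : Int := (N + k - 1) / k with hq
      have hdm := Int.mul_ediv_add_emod (N + k - 1) k
      have hmodnn := Int.emod_nonneg (N + k - 1) (by omega : k ≠ 0)
      have hmodlt := Int.emod_lt_of_pos (N + k - 1) hk
      have hql : k * (q - 1) < N := by nlinarith [hdm, hmodlt]
      have hqu : N ≤ k * q := by nlinarith [hdm, hmodnn]
      have hq1 : 1 ≤ q := by nlinarith
      have hcnt : (if (0:Int) < N then q.toNat else 0) = (q.toNat - 1) + 1 := by
        rw [if_pos hNpos]; omega
      rw [hcnt, List.range_succ_eq_map, List.map_cons, List.map_map]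
      by_cases hNk : N < k
      · -- short string: one padded group on both sides
        have hq1eq : q = 1 := by nlinarith
        rw [dsGo, dif_neg h0, if_pos (by exact_mod_cast hNk)]
        have : q.toNat - 1 = 0 := by omega
        rw [this]
        simp only [List.range_zero, List.map_nil]
        unfold aBody
        rw [if_pos (by push_cast; nlinarith)]
        simp [PySem.List.slice_from cs (le_refl (0:Int))]
      · -- k ≤ N: first full group, then recurse on the dropped tail
        push_neg at hNk
        rw [dsGo, dif_neg h0, if_neg (by exact_mod_cast not_lt.mpr hNk)]
        congr 1
        · -- head group
          unfold aBody
          simp only [Nat.cast_zero, mul_zero, zero_add]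
          by_cases hc : N ≤ k
          · have hNe : N = k := le_antisymm hc hNk
            rw [if_pos hc, PySem.List.slice_from cs (le_refl (0:Int)),
                PySem.List.slice_to cs (le_of_lt hk)]
            have h1 : k - N = 0 := by omega
            have h2 : cs.take k.toNat = cs := List.take_of_length_le (by omega)
            have h3 : k.toNat - cs.length = 0 := by omega
            simp [h1, h2, h3, PySem.List.pyRepeat]
          · rw [if_neg hc, PySem.List.slice_toNat cs (le_refl (0:Int)) (le_of_lt hk),
                PySem.List.slice_to cs (le_of_lt hk)]
            simp
        · -- tail groups
          rw [PySem.List.slice_from cs (le_of_lt hk)]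
          have hlen : ((cs.drop k.toNat).length : Int) = N - k := by
            simp only [List.length_drop]; omega
          have hlt : (cs.drop k.toNat).length < cs.length := by
            simp only [List.length_drop]; omega
          rw [← ih _ hlt _ rfl, hlen]
          have hcnt2 : (if (0:Int) < N - k then ((N - k + k - 1) / k).toNat else 0) = q.toNat - 1 := by
            by_cases hgt : (0:Int) < N - k
            · rw [if_pos hgt]
              have harith : N - k + k - 1 = (N + k - 1) + (-1) * k := by ring
              have : (N - k + k - 1) / k = q - 1 := by
                rw [harith, Int.add_mul_ediv_right _ _ (by omega : k ≠ 0), ← hq]; ring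
              rw [this]; omega
            · rw [if_neg hgt]
              have hNe : N = k := by omega
              have : q = 1 := by nlinarith
              omega
          rw [hcnt2]
          apply List.map_congr_left
          intro j hj
          simp only [Function.comp_apply]
          exact aBody_shift fill k hk cs hNk j

theorem divideString_spec_aux (s : String) (k : Int) (fill : String) (hk : k ≠ 0) :
    divideString s k fill = divideString_alt s k fill := by
  simp only [divideString, divideString_alt]
  set cs := s.toList with hcs
  have hN0 : (0 : Int) ≤ (cs.length : Int) := by positivity
  rcases lt_or_gt_of_ne hk with hneg | hpos
  · -- negative step: A's range is empty, B's guard fails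
    rw [pyRange_neg_step_nil _ _ hN0 hneg, dif_neg (by omega : ¬ (0:Int) < k)]
    simp
  · rw [dif_pos hpos, PySem.List.pyRange_of_pos 0 ((cs.length : Int)) hpos]
    simp only [zero_add, sub_zero]
    rw [show (fun (res : List String) (i : Int) =>
          if (cs.length : Int) ≤ i + k then
            res ++ [String.ofList (PySem.List.slice cs (some i) none ++
                      PySem.List.pyRepeat fill.toList (i + k - (cs.length : Int)))]
          else res ++ [String.ofList (PySem.List.slice cs (some i) (some (i + k)))]) =
        (fun res i => res ++ [if (cs.length : Int) ≤ i + k then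
            String.ofList (PySem.List.slice cs (some i) none ++
                      PySem.List.pyRepeat fill.toList (i + k - (cs.length : Int)))
          else String.ofList (PySem.List.slice cs (some i) (some (i + k)))]) from by
      funext res i; split_ifs <;> rfl]
    rw [PySem.List.foldl_append_singleton_eq_map, List.nil_append, List.map_map]
    exact chunk_eq fill.toList k hpos cs.length cs rfl

-- ===== VERDICT (by name: the statement is the Claim_ definition above) =====
theorem divideString_spec : Claim_equal_divideString := by
  intro s k fill _ hpre
  unfold Spec_divideString
  exact divideString_spec_aux s k fill hpre
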